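-- pv_equiv track=rewrite | github.com/frodef/nilan-cts600-homeassistant | custom_components/NilanCTS600/nilanCTS600.py | nilanStringApplyAttribute
-- ===== SOURCE A (Python) =====
-- def nilanStringApplyAttribute (string, attributeData, startBlink='{', endBlink='}'):
--     """ Apply string attribute, i.e. blinking, according to bits in attributeData. """
--     output = ""
--     mode = 0
--     for i in range (0, len(string)):
--         bitPos = i*2
--         newMode = (attributeData[bitPos//8]>>(bitPos&0x7)) & 0x03
--         if newMode != mode:
--             if newMode == 0x0:
--                 output += endBlink
--             elif newMode == 0x2:
--                 output += startBlink
--             mode = newMode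
--         output += string[i]
--     if mode != 0:
--         output += endBlink
--     return output
-- ===== SOURCE B (Python) =====
-- def nilanStringApplyAttribute(string, attributeData, startBlink='{', endBlink='}'):
--     """ Apply string attribute, i.e. blinking, according to bits in attributeData. """
--     n = len(string)
--     modes = [(attributeData[(2 * i) // 8] >> ((2 * i) & 0x7)) & 0x03 for i in range(n)]
--     out = []
--     prev = 0
--     i = 0
--     while i < n:
--         m = modes[i]
--         j = i
--         while j < n and modes[j] == m:
--             j += 1
--         if m != prev:
--             if m == 0:
--                 out.append(endBlink)
--             elif m == 2:
--                 out.append(startBlink)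
--             prev = m
--         out.append(string[i:j])
--         i = j
--     if prev != 0:
--         out.append(endBlink)
--     return ''.join(out)
-- ===== Notes on version B (the rewrite author's own statement) =====
-- stated objective: alternative
-- what changed: B replaces A's per-character state machine with run-length grouping: after precomputing the mode list it scans maximal runs of equal mode with a two-pointer inner loop, emits at most one marker per run and appends the whole run as a slice.
-- outside the precondition, e.g. on nilanStringApplyAttribute('abcde', [0], '{', '}'): A raises IndexError, B raises IndexError
import Mathlib
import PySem

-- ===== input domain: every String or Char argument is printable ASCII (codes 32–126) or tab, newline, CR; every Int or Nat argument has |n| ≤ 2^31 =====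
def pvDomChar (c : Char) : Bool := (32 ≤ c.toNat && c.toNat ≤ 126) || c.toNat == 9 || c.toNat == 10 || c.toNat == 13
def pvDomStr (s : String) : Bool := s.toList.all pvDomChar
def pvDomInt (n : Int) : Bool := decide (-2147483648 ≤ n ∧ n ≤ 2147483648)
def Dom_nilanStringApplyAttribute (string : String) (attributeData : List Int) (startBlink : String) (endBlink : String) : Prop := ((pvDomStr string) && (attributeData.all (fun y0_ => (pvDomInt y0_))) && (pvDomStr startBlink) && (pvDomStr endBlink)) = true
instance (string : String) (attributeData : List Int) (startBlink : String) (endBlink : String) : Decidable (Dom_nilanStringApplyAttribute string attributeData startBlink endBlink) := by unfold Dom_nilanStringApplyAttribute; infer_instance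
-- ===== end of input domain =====

-- B replaces A's per-character state machine with run-length grouping: scan maximal runs of
-- equal mode, emit at most one marker per run, append each run whole (objective: alternative).

-- ===== PORT A =====
-- shared arithmetic helper: (attributeData[(2i)//8] >> ((2i)&7)) & 3, the identical expression in both Pythons
-- (pyGet? = none is Python's IndexError; Pre_ excludes those inputs, the .getD 0 is never reached inside Pre_)
def pvModeAt (attributeData : List Int) (i : Nat) : Int :=
  let bitPos : Int := (i : Int) * 2
  PySem.Int.band (((PySem.List.pyGet? attributeData (PySem.Int.floordiv bitPos 8)).getD 0) >>> (PySem.Int.band bitPos 7).toNat) 3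

def pvStepA (sB eB : List Char) (attributeData : List Int) (cs : List Char) (st : List Char × Int) (i : Nat) : List Char × Int :=
  let newMode := pvModeAt attributeData i
  let st := if newMode ≠ st.2 then
      (st.1 ++ (if newMode = 0 then eB else if newMode = 2 then sB else []), newMode)
    else st
  (st.1 ++ [cs.getD i ' '], st.2)

def nilanStringApplyAttribute (string : String) (attributeData : List Int) (startBlink : String) (endBlink : String) : String :=
  let cs := string.toList
  let res := (List.range cs.length).foldl (pvStepA startBlink.toList endBlink.toList attributeData cs) ([], 0)
  String.ofList (if res.2 ≠ 0 then res.1 ++ endBlink.toList else res.1)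

-- ===== PORT B =====
-- mirrors Source B's outer while loop over runs: takeWhile/dropWhile is the inner `while modes[j]==m`
-- two-pointer scan, the appended run is the slice string[i:j]
def pvRunsB (sB eB : List Char) (prev : Int) : List (Int × Char) → List Char
  | [] => if prev ≠ 0 then eB else []
  | (m, c) :: t =>
    (if m ≠ prev then (if m = 0 then eB else if m = 2 then sB else []) else [])
      ++ (c :: (t.takeWhile (fun p => p.1 = m)).map Prod.snd)
      ++ pvRunsB sB eB m (t.dropWhile (fun p => p.1 = m))
termination_by l => l.length
decreasing_by
  exact Nat.lt_succ_of_le (List.length_dropWhile_le _ _)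

def nilanStringApplyAttribute_alt (string : String) (attributeData : List Int) (startBlink : String) (endBlink : String) : String :=
  let cs := string.toList
  let modes := (List.range cs.length).map (pvModeAt attributeData)
  String.ofList (pvRunsB startBlink.toList endBlink.toList 0 (modes.zip cs))

-- ===== PRECONDITION & SPEC =====
-- Pre_ excludes exactly the inputs on which the Python A raises IndexError (attributeData too
-- short for the string); B raises there at the analogous point too.
def Pre_nilanStringApplyAttribute (string : String) (attributeData : List Int) (startBlink : String) (endBlink : String) : Prop :=
  string.toList = [] ∨ 2 * ((string.toList.length : Int) - 1) / 8 < (attributeData.length : Int)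
instance (string : String) (attributeData : List Int) (startBlink : String) (endBlink : String) : Decidable (Pre_nilanStringApplyAttribute string attributeData startBlink endBlink) := by unfold Pre_nilanStringApplyAttribute; infer_instance
def pvWitness_nilanStringApplyAttribute : String × List Int × String × String := ("ab", [230], "{", "}")

def Spec_nilanStringApplyAttribute (string : String) (attributeData : List Int) (startBlink : String) (endBlink : String) (out : String) : Prop := out = nilanStringApplyAttribute_alt string attributeData startBlink endBlink
instance (string : String) (attributeData : List Int) (startBlink : String) (endBlink : String) (out : String) : Decidable (Spec_nilanStringApplyAttribute string attributeData startBlink endBlink out) := by unfold Spec_nilanStringApplyAttribute; infer_instance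

-- ===== CLAIM (what is proved, stated in full; the proofs are below) =====
def Claim_equal_nilanStringApplyAttribute : Prop := ∀ (string : String) (attributeData : List Int) (startBlink : String) (endBlink : String), Dom_nilanStringApplyAttribute string attributeData startBlink endBlink → Pre_nilanStringApplyAttribute string attributeData startBlink endBlink → Spec_nilanStringApplyAttribute string attributeData startBlink endBlink (nilanStringApplyAttribute string attributeData startBlink endBlink)

-- ===== LEMMAS AND PROOFS =====
-- reference computation: walk (mode, char) pairs, return (emitted chars, final mode)
def pvGo (sB eB : List Char) (mode : Int) : List (Int × Char) → List Char × Int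
  | [] => ([], mode)
  | (nm, c) :: t =>
    let e := if nm ≠ mode then (if nm = 0 then eB else if nm = 2 then sB else []) else []
    let r := pvGo sB eB nm t
    (e ++ c :: r.1, r.2)

theorem pvA_fold (sB eB : List Char) (ad : List Int) (cs : List Char) :
    ∀ (idxs : List Nat) (out : List Char) (mode : Int),
      idxs.foldl (pvStepA sB eB ad cs) (out, mode)
        = (out ++ (pvGo sB eB mode (idxs.map (fun i => (pvModeAt ad i, cs.getD i ' ')))).1,
           (pvGo sB eB mode (idxs.map (fun i => (pvModeAt ad i, cs.getD i ' ')))).2) := by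
  intro idxs
  induction idxs with
  | nil => intro out mode; simp [pvGo]
  | cons i t ih =>
    intro out mode
    by_cases h : pvModeAt ad i = mode
    · simp [pvStepA, h, pvGo, ih, List.append_assoc]
    · simp [pvStepA, h, pvGo, ih, List.append_assoc]

-- within a run of equal modes, pvGo just copies characters
theorem pvGo_run (sB eB : List Char) (m : Int) :
    ∀ (l : List (Int × Char)),
      pvGo sB eB m l = ((l.takeWhile (fun p => p.1 = m)).map Prod.snd
          ++ (pvGo sB eB m (l.dropWhile (fun p => p.1 = m))).1,
        (pvGo sB eB m (l.dropWhile (fun p => p.1 = m))).2) := by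
  intro l
  induction l with
  | nil => simp [pvGo]
  | cons a t ih =>
    cases a with
    | mk nm c =>
      by_cases h : nm = m
      · subst h
        simp only [List.takeWhile_cons, List.dropWhile_cons]
        simp [pvGo, ih]
      · simp [h, pvGo]

theorem pvRunsB_eq_aux (sB eB : List Char) :
    ∀ (n : Nat) (l : List (Int × Char)) (p : Int), l.length ≤ n →
      pvRunsB sB eB p l = (pvGo sB eB p l).1 ++ (if (pvGo sB eB p l).2 ≠ 0 then eB else []) := by
  intro n
  induction n with
  | zero =>
    intro l p h
    have : l = [] := List.eq_nil_of_length_eq_zero (Nat.le_zero.mp h)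
    subst this
    simp [pvRunsB, pvGo]
  | succ k ih =>
    intro l p h
    cases l with
    | nil => simp [pvRunsB, pvGo]
    | cons a t =>
      cases a with
      | mk m c =>
        have hlen : (t.dropWhile (fun p => p.1 = m)).length ≤ k := by
          have := List.length_dropWhile_le (fun p : Int × Char => p.1 = m) t
          simp at h
          omega
        rw [pvRunsB, ih _ m hlen]
        have hgo : pvGo sB eB p ((m, c) :: t)
            = ((if m ≠ p then (if m = 0 then eB else if m = 2 then sB else []) else [])
                ++ c :: (pvGo sB eB m t).1, (pvGo sB eB m t).2) := by
          simp [pvGo]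
        rw [hgo, pvGo_run sB eB m t]
        simp [List.append_assoc]

theorem pvRunsB_eq (sB eB : List Char) (l : List (Int × Char)) (p : Int) :
    pvRunsB sB eB p l = (pvGo sB eB p l).1 ++ (if (pvGo sB eB p l).2 ≠ 0 then eB else []) :=
  pvRunsB_eq_aux sB eB l.length l p (Nat.le_refl _)

theorem pv_getD_range_self (cs : List Char) :
    (List.range cs.length).map (fun i => cs.getD i ' ') = cs := by
  apply List.ext_getElem
  · simp
  · intro i h1 h2
    simp [List.getD, List.getElem?_eq_getElem h2]

theorem nilanStringApplyAttribute_spec : Claim_equal_nilanStringApplyAttribute := by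
  intro string attributeData startBlink endBlink _ _
  unfold Spec_nilanStringApplyAttribute nilanStringApplyAttribute nilanStringApplyAttribute_alt
  simp only []
  set sB := startBlink.toList
  set eB := endBlink.toList
  set cs := string.toList
  set ad := attributeData
  have hzip : ((List.range cs.length).map (pvModeAt ad)).zip cs
      = (List.range cs.length).map (fun i => (pvModeAt ad i, cs.getD i ' ')) := by
    have h1 : ((List.range cs.length).map (pvModeAt ad)).zip
          ((List.range cs.length).map (fun i => cs.getD i ' '))
        = (List.range cs.length).map (fun i => (pvModeAt ad i, cs.getD i ' ')) :=
      List.zip_map' ..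
    rw [pv_getD_range_self cs] at h1
    exact h1
  rw [pvA_fold, hzip, pvRunsB_eq]
  split_ifs with h
  · simp
  · simp
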